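-- pv_equiv track=rewrite | github.com/mganesh1610/AI_database_Analyzer | app.py | resolve_local_model_name
-- ===== SOURCE A (Python) =====
-- def resolve_local_model_name(model_name: str, installed_names: set[str]) -> str | None:
--     if model_name in installed_names:
--         return model_name
--     family = model_name.split(":", 1)[0]
--     target_tag = model_name.split(":", 1)[1] if ":" in model_name else ""
--     family_matches = sorted(name for name in installed_names if name == family or name.startswith(family + ":"))
--     if not family_matches:
--         return None
--     if target_tag:
--         for match in family_matches:
--             if match.endswith(":" + target_tag):
--                 return match
--     return family_matches[0]
-- ===== SOURCE B (Python) =====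
-- def resolve_local_model_name(model_name, installed_names):
--     if model_name in installed_names:
--         return model_name
--     family = model_name.split(":", 1)[0]
--     target_tag = model_name.split(":", 1)[1] if ":" in model_name else ""
--     prefix = family + ":"
--     suffix = ":" + target_tag
--     best_overall = None
--     best_tag = None
--     for name in installed_names:
--         if name == family or name.startswith(prefix):
--             if best_overall is None or name < best_overall:
--                 best_overall = name
--             if target_tag and name.endswith(suffix):
--                 if best_tag is None or name < best_tag:
--                     best_tag = name
--     if best_overall is None:
--         return None
--     if best_tag is not None:
--         return best_tag
--     return best_overall
-- ===== Notes on version B (the rewrite author's own statement) =====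
-- stated objective: faster
-- what changed: A builds the list of family matches and sorts it to pick the first (and the first tag-suffix) element; B makes a single pass over installed_names maintaining two running lexicographic minima (best overall match and best tag match), with no intermediate list and no sort.
import Mathlib
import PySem

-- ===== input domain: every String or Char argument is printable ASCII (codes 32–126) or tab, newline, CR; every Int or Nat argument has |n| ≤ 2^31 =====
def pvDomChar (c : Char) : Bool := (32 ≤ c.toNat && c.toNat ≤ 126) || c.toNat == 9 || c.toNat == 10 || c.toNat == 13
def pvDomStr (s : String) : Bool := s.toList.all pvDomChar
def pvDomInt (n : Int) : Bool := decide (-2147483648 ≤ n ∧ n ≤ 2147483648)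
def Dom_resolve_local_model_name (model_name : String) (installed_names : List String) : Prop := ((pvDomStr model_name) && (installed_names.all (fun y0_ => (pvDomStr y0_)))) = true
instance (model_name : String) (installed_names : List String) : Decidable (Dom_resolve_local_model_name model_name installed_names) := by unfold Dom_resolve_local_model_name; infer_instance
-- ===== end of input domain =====

-- B replaces A's build-list-then-sort with a single pass keeping two running lexicographic minima (best overall / best tag match); objective: faster (no sort, measured).


-- ===== PORT A =====
def resolve_local_model_name (model_name : String) (installed_names : List String) : Option String :=
  if model_name ∈ installed_names then some model_name
  else
    let parts := (PySem.Str.splitMax? model_name ":" 1).getD [model_name]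
    let family := parts.headD ""
    let target_tag := if PySem.Str.isIn ":" model_name then (parts.drop 1).headD "" else ""
    let family_matches := PySem.List.sorted
      (installed_names.filter (fun name => name == family || PySem.Str.startswith name (family ++ ":")))
      (fun x => x.toList) false
    match family_matches with
    | [] => none
    | m0 :: rest =>
      if target_tag != "" then
        match (m0 :: rest).find? (fun m => PySem.Str.endswith m (":" ++ target_tag)) with
        | some m => some m
        | none => some m0
      else some m0

-- ===== PORT B =====
def resolve_local_model_name_alt (model_name : String) (installed_names : List String) : Option String :=
  if model_name ∈ installed_names then some model_name
  else
    let parts := (PySem.Str.splitMax? model_name ":" 1).getD [model_name]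
    let family := parts.headD ""
    let target_tag := if PySem.Str.isIn ":" model_name then (parts.drop 1).headD "" else ""
    let pre := family ++ ":"
    let suf := ":" ++ target_tag
    let r := installed_names.foldl (fun s name =>
      if name == family || PySem.Str.startswith name pre then
        ( some (match s.1 with | none => name | some b => if PySem.Chars.strLt name.toList b.toList then name else b),
          if target_tag != "" && PySem.Str.endswith name suf then
            some (match s.2 with | none => name | some b => if PySem.Chars.strLt name.toList b.toList then name else b)
          else s.2 )
      else s) (none, none)
    match r.1 with
    | none => none
    | some bo => match r.2 with | some bt => some bt | none => some bo

-- ===== PRECONDITION & SPEC =====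
def Spec_resolve_local_model_name (model_name : String) (installed_names : List String) (out : Option String) : Prop := out = resolve_local_model_name_alt model_name installed_names
instance (model_name : String) (installed_names : List String) (out : Option String) : Decidable (Spec_resolve_local_model_name model_name installed_names out) := by unfold Spec_resolve_local_model_name; infer_instance

-- ===== CLAIM (what is proved, stated in full; the proofs are below) =====
def Claim_equal_resolve_local_model_name : Prop := ∀ (model_name : String) (installed_names : List String), Dom_resolve_local_model_name model_name installed_names → Spec_resolve_local_model_name model_name installed_names (resolve_local_model_name model_name installed_names)

-- ===== LEMMAS AND PROOFS =====
lemma sorted_transfer {α κ : Type} [LO : LinearOrder κ] (inst1 : LT κ) (inst2 : @DecidableLT κ inst1)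
    (h : ∀ a b : κ, inst1.lt a b ↔ LO.lt a b) (xs : List α) (key : α → κ) :
    @PySem.List.sorted α κ inst1 inst2 xs key false
    = @PySem.List.sorted α κ (@Preorder.toLT κ (@PartialOrder.toPreorder κ (@LinearOrder.toPartialOrder κ LO)))
        (@LinearOrder.toDecidableLT κ LO) xs key false := by
  rw [@PySem.List.sorted_eq_foldl_insertBy α κ inst1 inst2 xs key]
  rw [@PySem.List.sorted_eq_foldl_insertBy α κ (@Preorder.toLT κ (@PartialOrder.toPreorder κ (@LinearOrder.toPartialOrder κ LO))) (@LinearOrder.toDecidableLT κ LO) xs key]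
  congr 1
  funext acc x
  congr 1
  funext a b
  exact decide_eq_decide.mpr (h (key a) (key b))

lemma my_sorted_pairwise (L : List String) :
    (PySem.List.sorted L (fun x : String => x.toList) false).Pairwise (fun a b => a.toList ≤ b.toList) := by
  rw [sorted_transfer (α := String) (κ := List Char) List.instLT (fun a b => a.decidableLT b)
      (fun a b => List.lt_iff_lex_lt a b) L (fun x : String => x.toList)]
  exact PySem.List.sorted_pairwise L (fun x : String => x.toList)

def updMin (a : Option String) (n : String) : Option String :=
  some (match a with | none => n | some b => if PySem.Chars.strLt n.toList b.toList then n else b)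

def gMin (p : String → Bool) (c : Option String) (name : String) : Option String :=
  if p name then updMin c name else c

lemma foldPair (p q : String → Bool) (xs : List String) (a b : Option String) :
    xs.foldl (fun s name =>
      if p name then
        ( some (match s.1 with | none => name | some b => if PySem.Chars.strLt name.toList b.toList then name else b),
          if q name then
            some (match s.2 with | none => name | some b => if PySem.Chars.strLt name.toList b.toList then name else b)
          else s.2 )
      else s) (a, b)
    = (xs.foldl (gMin p) a, xs.foldl (gMin (fun n => p n && q n)) b) := by
  induction xs generalizing a b with
  | nil => rfl
  | cons x t ih =>
    simp only [List.foldl_cons]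
    rw [ih]
    by_cases hp : p x <;> by_cases hq : q x <;>
      simp [gMin, updMin, hp, hq]

lemma gMin_some_spec (p : String → Bool) : ∀ (xs : List String) (b0 : String),
    ∃ m, xs.foldl (gMin p) (some b0) = some m ∧ (m = b0 ∨ (m ∈ xs ∧ p m)) ∧ m.toList ≤ b0.toList ∧
      ∀ y ∈ xs, p y → m.toList ≤ y.toList := by
  intro xs
  induction xs with
  | nil => intro b0; exact ⟨b0, rfl, Or.inl rfl, le_refl _, by simp⟩
  | cons x t ih =>
    intro b0
    by_cases hp : p x
    · set c := if PySem.Chars.strLt x.toList b0.toList then x else b0 with hc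
      have hcb : c.toList ≤ b0.toList ∧ c.toList ≤ x.toList ∧ (c = x ∨ c = b0) := by
        by_cases hlt : x.toList < b0.toList
        · simp [hc, PySem.Chars.strLt, hlt, le_of_lt hlt]
        · simp [hc, PySem.Chars.strLt, hlt, le_of_not_gt hlt]
      obtain ⟨m, hm, hmem, hle, hmin⟩ := ih c
      refine ⟨m, ?_, ?_, ?_, ?_⟩
      · simpa [gMin, updMin, hp, hc] using hm
      · rcases hmem with h | h
        · rcases hcb.2.2 with h2 | h2
          · exact Or.inr ⟨by simp [h, h2], by rw [h, h2]; exact hp⟩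
          · exact Or.inl (h.trans h2)
        · exact Or.inr ⟨List.mem_cons_of_mem _ h.1, h.2⟩
      · exact hle.trans hcb.1
      · intro y hy hpy
        rcases List.mem_cons.mp hy with rfl | hyt
        · exact hle.trans hcb.2.1
        · exact hmin y hyt hpy
    · obtain ⟨m, hm, hmem, hle, hmin⟩ := ih b0
      refine ⟨m, by simpa [gMin, hp] using hm, ?_, hle, ?_⟩
      · rcases hmem with h | h
        · exact Or.inl h
        · exact Or.inr ⟨List.mem_cons_of_mem _ h.1, h.2⟩
      · intro y hy hpy
        rcases List.mem_cons.mp hy with rfl | hyt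
        · exact absurd hpy (by simpa using hp)
        · exact hmin y hyt hpy

lemma gMin_none_spec (p : String → Bool) (xs : List String) :
    (xs.foldl (gMin p) none = none ∧ ∀ y ∈ xs, ¬ p y) ∨
    ∃ m, xs.foldl (gMin p) none = some m ∧ m ∈ xs ∧ p m ∧ ∀ y ∈ xs, p y → m.toList ≤ y.toList := by
  induction xs with
  | nil => exact Or.inl ⟨rfl, by simp⟩
  | cons x t ih =>
    by_cases hp : p x
    · right
      obtain ⟨m, hm, hmem, hle, hmin⟩ := gMin_some_spec p t x
      refine ⟨m, by simpa [gMin, updMin, hp] using hm, ?_, ?_, ?_⟩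
      · rcases hmem with rfl | h
        · exact List.mem_cons_self
        · exact List.mem_cons_of_mem _ h.1
      · rcases hmem with rfl | h
        · exact hp
        · exact h.2
      · intro y hy hpy
        rcases List.mem_cons.mp hy with rfl | hyt
        · exact hle
        · exact hmin y hyt hpy
    · rcases ih with ⟨h1, h2⟩ | ⟨m, hm, hmem, hpm, hmin⟩
      · left
        refine ⟨by simpa [gMin, hp] using h1, ?_⟩
        intro y hy
        rcases List.mem_cons.mp hy with rfl | hyt
        · simpa using hp
        · exact h2 y hyt
      · right
        refine ⟨m, by simpa [gMin, hp] using hm, List.mem_cons_of_mem _ hmem, hpm, ?_⟩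
        intro y hy hpy
        rcases List.mem_cons.mp hy with rfl | hyt
        · exact absurd hpy (by simpa using hp)
        · exact hmin y hyt hpy

lemma find?_min_of_pairwise (q : String → Bool) :
    ∀ (S : List String), S.Pairwise (fun a b => a.toList ≤ b.toList) →
    ∀ m, S.find? q = some m → m ∈ S ∧ q m ∧ ∀ y ∈ S, q y → m.toList ≤ y.toList := by
  intro S
  induction S with
  | nil => intro _ m hm; simp at hm
  | cons x t ih =>
    intro hpw m hm
    rcases List.pairwise_cons.mp hpw with ⟨hx, ht⟩
    by_cases hq : q x
    · rw [List.find?_cons_of_pos hq] at hm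
      cases hm
      refine ⟨List.mem_cons_self, hq, ?_⟩
      intro y hy hqy
      rcases List.mem_cons.mp hy with rfl | hyt
      · exact le_refl _
      · exact hx y hyt
    · rw [List.find?_cons_of_neg hq] at hm
      obtain ⟨hmem, hqm, hmin⟩ := ih ht m hm
      refine ⟨List.mem_cons_of_mem _ hmem, hqm, ?_⟩
      intro y hy hqy
      rcases List.mem_cons.mp hy with rfl | hyt
      · exact absurd hqy (by simpa using hq)
      · exact hmin y hyt hqy

lemma fold_false (xs : List String) (c : Option String) :
    xs.foldl (gMin (fun _ => false)) c = c := by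
  induction xs with
  | nil => rfl
  | cons x t ih => simpa [gMin] using ih

lemma core (f tt : String) (ins : List String) :
    (match PySem.List.sorted (ins.filter (fun name => name == f || PySem.Str.startswith name (f ++ ":"))) (fun x => x.toList) false with
     | [] => none
     | m0 :: rest =>
       if tt != "" then
         match (m0 :: rest).find? (fun m => PySem.Str.endswith m (":" ++ tt)) with
         | some m => some m
         | none => some m0
       else some m0)
    = (match (ins.foldl (fun s name =>
          if name == f || PySem.Str.startswith name (f ++ ":") then
            ( some (match s.1 with | none => name | some b => if PySem.Chars.strLt name.toList b.toList then name else b),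
              if tt != "" && PySem.Str.endswith name (":" ++ tt) then
                some (match s.2 with | none => name | some b => if PySem.Chars.strLt name.toList b.toList then name else b)
              else s.2 )
          else s) ((none : Option String), (none : Option String))).1 with
       | none => none
       | some bo =>
         match (ins.foldl (fun s name =>
          if name == f || PySem.Str.startswith name (f ++ ":") then
            ( some (match s.1 with | none => name | some b => if PySem.Chars.strLt name.toList b.toList then name else b),
              if tt != "" && PySem.Str.endswith name (":" ++ tt) then
                some (match s.2 with | none => name | some b => if PySem.Chars.strLt name.toList b.toList then name else b)
              else s.2 )
          else s) ((none : Option String), (none : Option String))).2 with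
         | some bt => some bt
         | none => some bo) := by
  rw [foldPair (fun name => name == f || PySem.Str.startswith name (f ++ ":"))
      (fun name => tt != "" && PySem.Str.endswith name (":" ++ tt)) ins none none]
  set P : String → Bool := fun name => name == f || PySem.Str.startswith name (f ++ ":") with hP
  set Q : String → Bool := fun m => PySem.Str.endswith m (":" ++ tt) with hQ
  set L := ins.filter P with hL
  rcases gMin_none_spec P ins with ⟨h1, h2⟩ | ⟨bo, hbo, hboMem, hboP, hboMin⟩
  · have hLnil : L = [] := List.filter_eq_nil_iff.mpr (by intro a ha; simpa using h2 a ha)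
    rw [h1, hLnil, (PySem.List.sorted_eq_nil_iff ([] : List String) (fun x => x.toList) false).mpr rfl]
  · dsimp only
    rw [hbo]
    have hboL : bo ∈ L := List.mem_filter.mpr ⟨hboMem, hboP⟩
    cases hS : PySem.List.sorted L (fun x => x.toList) false with
    | nil =>
      rw [(PySem.List.sorted_eq_nil_iff L (fun x => x.toList) false).mp hS] at hboL
      exact absurd hboL (List.not_mem_nil)
    | cons m0 rest =>
      have hm0L : m0 ∈ L := ((hS ▸ PySem.List.sorted_perm L (fun x => x.toList) false).mem_iff).mp
        List.mem_cons_self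
      have hpwS : (m0 :: rest).Pairwise (fun a b : String => a.toList ≤ b.toList) := by
        have := my_sorted_pairwise L
        rwa [hS] at this
      have hm0Min : ∀ y ∈ L, m0.toList ≤ y.toList := by
        intro y hy
        have hyS : y ∈ m0 :: rest := by
          rw [← hS]
          exact (PySem.List.mem_sorted L (fun x : String => x.toList) false y).mpr hy
        rcases List.mem_cons.mp hyS with rfl | hyt
        · exact le_refl _
        · exact (List.pairwise_cons.mp hpwS).1 y hyt
      have hbom0 : bo = m0 := String.toList_inj.mp (le_antisymm
        (hboMin m0 (List.mem_filter.mp hm0L).1 (List.mem_filter.mp hm0L).2)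
        (hm0Min bo hboL))
      cases htt : (tt != "") with
      | false =>
        simp only [Bool.false_and, Bool.and_false]
        rw [fold_false]
        simp [hbom0]
      | true =>
        simp only [Bool.true_and, if_true]
        rcases gMin_none_spec (fun n => P n && Q n) ins with ⟨k1, k2⟩ | ⟨bt, hbt, htMem, htPQ, htMin⟩
        · rw [k1]
          have hfn : (m0 :: rest).find? Q = none := by
            rw [List.find?_eq_none]
            intro x hx
            have hxL : x ∈ L := by
              have := (PySem.List.mem_sorted (x := x) (xs := L) (key := fun y => y.toList) (rev := false)).mp
              rw [hS] at this
              exact this hx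
            have := k2 x (List.mem_filter.mp hxL).1
            simp only [Bool.and_eq_true, not_and] at this
            intro hqx
            exact this (List.mem_filter.mp hxL).2 hqx
          rw [hfn, hbom0]
        · rw [hbt]
          simp only [Bool.and_eq_true] at htPQ
          have hbtL : bt ∈ L := List.mem_filter.mpr ⟨htMem, htPQ.1⟩
          have hbtS : bt ∈ m0 :: rest := by
            have := (PySem.List.mem_sorted (x := bt) (xs := L) (key := fun y => y.toList) (rev := false)).mpr hbtL
            rwa [hS] at this
          cases hfind : (m0 :: rest).find? Q with
          | none =>
            exact absurd htPQ.2 (List.find?_eq_none.mp hfind bt hbtS)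
          | some m =>
            obtain ⟨hmS, hmQ, hmMin⟩ := find?_min_of_pairwise Q (m0 :: rest) hpwS m hfind
            have hmL : m ∈ L := by
              have := (PySem.List.mem_sorted (x := m) (xs := L) (key := fun y => y.toList) (rev := false)).mp
              rw [hS] at this
              exact this hmS
            have : m = bt := String.toList_inj.mp (le_antisymm
              (hmMin bt hbtS htPQ.2)
              (htMin m (List.mem_filter.mp hmL).1 (by simp [(List.mem_filter.mp hmL).2, hmQ]))).symm ▸ rfl
            rw [this]

lemma main_eq (mn : String) (ins : List String) : resolve_local_model_name mn ins = resolve_local_model_name_alt mn ins := by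
  by_cases hmem : mn ∈ ins
  · simp [resolve_local_model_name, resolve_local_model_name_alt, hmem]
  · simp only [resolve_local_model_name, resolve_local_model_name_alt, hmem, if_false]
    exact core _ _ ins

-- ===== VERDICT (by name: the statement is the Claim_ definition above) =====
theorem resolve_local_model_name_spec : Claim_equal_resolve_local_model_name := by
  intro model_name installed_names _
  unfold Spec_resolve_local_model_name
  exact main_eq model_name installed_names
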